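-- pv_equiv track=rewrite | github.com/Rubven/Hanyang-Data-Science | project_apriori/apriori.py | generate_1_itemset_candidates
-- ===== SOURCE A (Python) =====
-- def generate_1_itemset_candidates(transactions):
--
--     candidates = []
--     for transaction in transactions:
--         for item in transaction:
--             if [item] not in candidates:
--                 candidates.append([item])
--     candidates.sort()
--
--     return list(map(frozenset, candidates))
-- ===== SOURCE B (Python) =====
-- def generate_1_itemset_candidates(transactions):
--     flat = sorted(item for transaction in transactions for item in transaction)
--     out = []
--     prev = None
--     for x in flat:
--         if x != prev:
--             out.append(frozenset([x]))
--             prev = x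
--     return out
-- ===== Notes on version B (the rewrite author's own statement) =====
-- stated objective: faster
-- what changed: Replaces A's quadratic accumulation (linear membership scan of the candidate list per item, then a sort of singleton lists) with flatten-all-items, one sort of the raw items, and a single adjacent-deduplication pass; stays list/comparison-based like A.
import Mathlib
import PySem

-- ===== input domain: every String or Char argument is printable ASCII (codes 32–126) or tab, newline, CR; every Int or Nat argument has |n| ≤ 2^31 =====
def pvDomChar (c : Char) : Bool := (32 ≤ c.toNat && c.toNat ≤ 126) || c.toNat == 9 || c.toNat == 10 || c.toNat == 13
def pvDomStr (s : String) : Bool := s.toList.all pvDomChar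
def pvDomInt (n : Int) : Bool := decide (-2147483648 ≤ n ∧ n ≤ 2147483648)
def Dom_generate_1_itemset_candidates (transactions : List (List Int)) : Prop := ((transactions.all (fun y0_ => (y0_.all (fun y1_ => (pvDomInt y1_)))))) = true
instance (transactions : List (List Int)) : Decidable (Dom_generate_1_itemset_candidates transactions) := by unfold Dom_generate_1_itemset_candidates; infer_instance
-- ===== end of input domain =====

-- B replaces A's quadratic membership-checked accumulation by flatten → sort once → one
-- adjacent-dedup pass (objective: faster; list/comparison-based like A).


-- ===== PORT A =====
-- frozenset(c) is ported as PySem.Set.ofList c (distinct elements, first-insertion order);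
-- Python's list '<' on List Int is Lean's lexicographic '<' on List Int (exact here).
def generate_1_itemset_candidates (transactions : List (List Int)) : List (List Int) :=
  let candidates :=
    transactions.foldl (fun cs transaction =>
      transaction.foldl (fun cs item =>
        if [item] ∈ cs then cs else cs ++ [[item]]) cs) []
  let candidates := PySem.List.sorted candidates (fun c => c) false
  candidates.map (fun c => PySem.Set.ofList c)

-- ===== PORT B =====
def generate_1_itemset_candidates_alt (transactions : List (List Int)) : List (List Int) :=
  let flat := PySem.List.sorted
    (transactions.foldl (fun acc transaction => acc ++ transaction) []) (fun x => x) false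
  (flat.foldl (fun (st : List (List Int) × Option Int) x =>
      if some x ≠ st.2 then (st.1 ++ [PySem.Set.ofList [x]], some x) else st)
    ([], none)).1

-- ===== PRECONDITION & SPEC =====
def Spec_generate_1_itemset_candidates (transactions : List (List Int)) (out : List (List Int)) : Prop := out = generate_1_itemset_candidates_alt transactions
instance (transactions : List (List Int)) (out : List (List Int)) : Decidable (Spec_generate_1_itemset_candidates transactions out) := by unfold Spec_generate_1_itemset_candidates; infer_instance

-- ===== CLAIM (what is proved, stated in full; the proofs are below) =====
def Claim_equal_generate_1_itemset_candidates : Prop := ∀ (transactions : List (List Int)), Dom_generate_1_itemset_candidates transactions → Spec_generate_1_itemset_candidates transactions (generate_1_itemset_candidates transactions)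

-- ===== LEMMAS AND PROOFS =====

-- [x] as a List Int, B's emitted item
def pvSing (x : Int) : List Int := [x]

-- adjacent-dedup of B's loop, as a structural recursion on the sorted list
def pvDD : List Int → Option Int → List Int
  | [], _ => []
  | x :: xs, prev => if some x ≠ prev then x :: pvDD xs (some x) else pvDD xs prev

theorem pvSing_lt_pvSing {a b : Int} : pvSing a < pvSing b ↔ a < b := by
  constructor
  · intro h
    cases h with
    | rel h => exact h
    | cons h => cases h
  · intro h; exact List.Lex.rel h

theorem mem_map_pvSing {x : Int} {s : List Int} : pvSing x ∈ s.map pvSing ↔ x ∈ s := by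
  simp [pvSing]

-- A's inner accumulation over any item stream equals Python set-insertion, mapped through pvSing
theorem foldA_eq_map_add (flat : List Int) : ∀ (s : List Int),
    flat.foldl (fun cs item => if [item] ∈ cs then cs else cs ++ [[item]]) (s.map pvSing)
      = (flat.foldl PySem.Set.add s).map pvSing := by
  induction flat with
  | nil => intro s; rfl
  | cons x t ih =>
    intro s
    by_cases hx : x ∈ s
    · have h1 : [x] ∈ s.map pvSing := mem_map_pvSing.mpr hx
      have h2 : PySem.Set.add s x = s := by
        simp [PySem.Set.add, PySem.Set.contains, hx]
      simp only [List.foldl_cons, if_pos h1, h2]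
      exact ih s
    · have h1 : [x] ∉ s.map pvSing := fun h => hx (mem_map_pvSing.mp h)
      have h2 : PySem.Set.add s x = s ++ [x] := by
        simp [PySem.Set.add, PySem.Set.contains, hx]
      simp only [List.foldl_cons, if_neg h1, h2]
      have : s.map pvSing ++ [[x]] = (s ++ [x]).map pvSing := by simp [pvSing]
      rw [this]; exact ih (s ++ [x])

-- B's loop equals the adjacent-dedup pvDD, mapped through pvSing
theorem foldB_eq_dd (s : List Int) : ∀ (out : List (List Int)) (prev : Option Int),
    (s.foldl (fun (st : List (List Int) × Option Int) x =>
        if some x ≠ st.2 then (st.1 ++ [PySem.Set.ofList [x]], some x) else st)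
      (out, prev)).1 = out ++ (pvDD s prev).map pvSing := by
  induction s with
  | nil => intro out prev; simp [pvDD]
  | cons x t ih =>
    intro out prev
    by_cases h : some x ≠ prev
    · simp only [List.foldl_cons, if_pos h, ih, pvDD]
      simp [pvSing, PySem.Set.ofList, PySem.Set.add, PySem.Set.contains]
    · simp only [List.foldl_cons, if_neg h, ih, pvDD]

theorem pvDD_mem (s : List Int) : ∀ (prev : Option Int),
    s.Pairwise (· ≤ ·) → (∀ p, prev = some p → ∀ y ∈ s, p ≤ y) →
    ∀ x, x ∈ pvDD s prev ↔ x ∈ s ∧ some x ≠ prev := by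
  induction s with
  | nil => intro prev _ _ x; simp [pvDD]
  | cons a t ih =>
    intro prev hp hlb x
    have ht : t.Pairwise (· ≤ ·) := hp.of_cons
    have hat : ∀ y ∈ t, a ≤ y := fun y hy => List.rel_of_pairwise_cons hp hy
    by_cases h : some a ≠ prev
    · rw [pvDD, if_pos h]
      have ihx := ih (some a) ht (fun p hpa y hy => by cases hpa; exact hat y hy) x
      rw [List.mem_cons, ihx, List.mem_cons]
      constructor
      · rintro (rfl | ⟨hxt, hxa⟩)
        · exact ⟨Or.inl rfl, h⟩
        · refine ⟨Or.inr hxt, ?_⟩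
          rcases prev with _ | p
          · simp
          · intro hc
            have hxp : x = p := by injection hc
            have h2 : a ≤ x := hat x hxt
            have h3 : p ≤ a := hlb p rfl a List.mem_cons_self
            have hax : x = a := by omega
            exact hxa (congrArg some hax)
      · rintro ⟨(rfl | hxt), hxp⟩
        · exact Or.inl rfl
        · by_cases hxa : x = a
          · exact Or.inl hxa
          · exact Or.inr ⟨hxt, by simpa using hxa⟩
    · have hpe : prev = some a := (not_not.mp h).symm
      subst hpe
      rw [pvDD, if_neg (by simp)]
      have ihx := ih (some a) ht (fun p hpa y hy => by cases hpa; exact hat y hy) x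
      rw [ihx, List.mem_cons]
      constructor
      · rintro ⟨hxt, hxa⟩; exact ⟨Or.inr hxt, hxa⟩
      · rintro ⟨(rfl | hxt), hxa⟩
        · simp at hxa
        · exact ⟨hxt, hxa⟩

theorem pvDD_pairwise (s : List Int) : ∀ (prev : Option Int),
    s.Pairwise (· ≤ ·) → (pvDD s prev).Pairwise (· < ·) := by
  induction s with
  | nil => intro prev _; simp [pvDD]
  | cons a t ih =>
    intro prev hp
    have ht : t.Pairwise (· ≤ ·) := hp.of_cons
    have hat : ∀ y ∈ t, a ≤ y := fun y hy => List.rel_of_pairwise_cons hp hy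
    by_cases h : some a ≠ prev
    · rw [pvDD, if_pos h]
      refine List.pairwise_cons.mpr ⟨?_, ih (some a) ht⟩
      intro y hy
      obtain ⟨hyt, hya⟩ :=
        (pvDD_mem t (some a) ht (fun p hpa z hz => by cases hpa; exact hat z hz) y).mp hy
      have h1 : a ≤ y := hat y hyt
      have h2 : y ≠ a := fun hc => hya (congrArg some hc)
      omega
    · have hpe : prev = some a := (not_not.mp h).symm
      subst hpe
      rw [pvDD, if_neg (by simp)]
      exact ih (some a) ht

-- the sort in port A elaborates with core's List LT/DecidableLT instances; the order lemmas
-- use Mathlib's LinearOrder (List Int) instances — same order, so the sorts are equal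
theorem pvSorted_inst_bridge (xs : List (List Int)) :
    PySem.List.sorted xs (fun c : List Int => c) false
      = @PySem.List.sorted (List Int) (List Int) List.instLinearOrder.toLT
        LinearOrder.toDecidableLT xs (fun c => c) false := by
  rw [PySem.List.sorted_eq_foldl_insertBy,
    @PySem.List.sorted_eq_foldl_insertBy (List Int) (List Int) List.instLinearOrder.toLT
      LinearOrder.toDecidableLT xs (fun c => c)]
  congr 1
  funext acc x
  congr 1
  funext a b
  exact decide_eq_decide.mpr Iff.rfl

-- ===== VERDICT (by name: the statement is the Claim_ definition above) =====
theorem generate_1_itemset_candidates_spec : Claim_equal_generate_1_itemset_candidates := by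
  intro transactions _
  unfold Spec_generate_1_itemset_candidates
  unfold generate_1_itemset_candidates generate_1_itemset_candidates_alt
  simp only []
  set F := transactions.flatten with hF
  -- A's candidate accumulation is dedup of the flattened stream, mapped through pvSing
  have hAacc : transactions.foldl (fun cs transaction =>
      transaction.foldl (fun cs item => if [item] ∈ cs then cs else cs ++ [[item]]) cs) []
      = (PySem.Set.ofList F).map pvSing := by
    rw [← List.foldl_flatten, ← hF]
    have := foldA_eq_map_add F []
    simpa [PySem.Set.ofList_eq_foldl] using this
  -- B's flattening
  have hBflat : transactions.foldl (fun acc transaction => acc ++ transaction) [] = F := by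
    simpa using PySem.List.foldl_append_eq_flatten transactions []
  set S := PySem.List.sorted F (fun x => x) false with hS
  have hSp : S.Pairwise (· ≤ ·) := PySem.List.sorted_pairwise F (fun x => x)
  set zs := pvDD S none with hzs
  have hBside : (List.foldl (fun (st : List (List Int) × Option Int) x =>
      if some x ≠ st.2 then (st.1 ++ [PySem.Set.ofList [x]], some x) else st)
      ([], none) S).1 = zs.map pvSing := by
    simpa using foldB_eq_dd S [] none
  -- zs is a strictly increasing rearrangement of the dedup'd items
  have hzmem : ∀ x, x ∈ zs ↔ x ∈ F := by
    intro x
    rw [hzs, pvDD_mem S none hSp (by intro p hp; cases hp)]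
    simp [PySem.List.mem_sorted, hS]
  have hzlt : zs.Pairwise (· < ·) := pvDD_pairwise S none hSp
  have hznd : zs.Nodup := hzlt.imp ne_of_lt
  have hperm : zs.Perm (PySem.Set.ofList F) :=
    (List.perm_ext_iff_of_nodup hznd (PySem.Set.nodup_ofList F)).mpr
      (fun x => by rw [hzmem x, PySem.Set.mem_ofList])
  -- name A's sorted output: it is zs.map pvSing
  have hsorted : PySem.List.sorted ((PySem.Set.ofList F).map pvSing) (fun c => c) false
      = zs.map pvSing := by
    rw [pvSorted_inst_bridge]
    exact PySem.List.sorted_eq_of_perm_of_pairwise_lt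
      ((PySem.Set.ofList F).map pvSing) (zs.map pvSing) (fun c => c)
      (hperm.map pvSing)
      ((List.pairwise_map).mpr (hzlt.imp (fun h => pvSing_lt_pvSing.mpr h)))
  rw [hAacc, hsorted, hBflat, ← hS, hBside]
  -- frozenset over a singleton is that singleton
  simp [pvSing, PySem.Set.ofList]
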